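-- pv_equiv track=rewrite | github.com/naderfares/PolyRiskScore | static/downloadables/connect_to_server_backup.py | getPreferredPop
-- ===== SOURCE A (Python) =====
-- def getPopList(popListStr):
--     if isinstance(popListStr, list):
--         if len(popListStr) == 1 and "|" in popListStr[0]:
--             popListStr = popListStr[0].upper()
--         else:
--             return [pop.upper() for pop in popListStr]
--
--     popList = []
--     popListStr = popListStr.upper()
--     # split the string on bars if they are present, otherwise add the string to a list of length 1
--     if "|" in popListStr:
--         popList = popListStr.split("|")
--     else:
--         popList = [popListStr]
--     return popList
--
-- def getPreferredPop(popList, superPop):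
--     popList = getPopList(popList)
--     # convert all populations listed in the gwas to lower case
--     if len(popList) == 1 and str(popList[0]).lower() == 'na':
--         return(superPop)
--     else:
--         superPopHeirarchy = {
--             'EUR': ['EUR', 'AMR', 'SAS', 'EAS', 'AFR'],
--             'AMR': ['AMR', 'EUR', 'SAS', 'EAS', 'AFR'],
--             'SAS': ['SAS', 'EAS', 'AMR', 'EUR', 'AFR'],
--             'EAS': ['EAS', 'SAS', 'AMR', 'EUR', 'AFR'],
--             'AFR': ['AFR', 'AMR', 'SAS', 'EUR', 'EAS']
--         }
--         keys = superPopHeirarchy[superPop]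
--         for pop in keys:
--             if pop in popList:
--                 # return the first pop from the heirarchy that is in the pop list
--                 return pop
--
--     # if none of the pops from the heirarchy are in the pop list, return the requested super pop
--     return superPop
-- ===== SOURCE B (Python) =====
-- def _hierarchy(superPop):
--     if superPop == 'EUR': return ['EUR', 'AMR', 'SAS', 'EAS', 'AFR']
--     if superPop == 'AMR': return ['AMR', 'EUR', 'SAS', 'EAS', 'AFR']
--     if superPop == 'SAS': return ['SAS', 'EAS', 'AMR', 'EUR', 'AFR']
--     if superPop == 'EAS': return ['EAS', 'SAS', 'AMR', 'EUR', 'AFR']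
--     if superPop == 'AFR': return ['AFR', 'AMR', 'SAS', 'EUR', 'EAS']
--     raise KeyError(superPop)
--
-- def getPreferredPop(popList, superPop):
--     # normalise first (uppercase everything, then split a single bar-joined entry)
--     pops = popList if isinstance(popList, list) else [popList]
--     ups = [str(p).upper() for p in pops]
--     if len(ups) == 1 and "|" in ups[0]:
--         ups = ups[0].split("|")
--     if [p.lower() for p in ups] == ['na']:
--         return superPop
--     keys = _hierarchy(superPop)
--     # scan the gwas populations, keeping the one ranked best by the hierarchy
--     matched = [p for p in ups if p in keys]
--     if matched:
--         return min(matched, key=keys.index)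
--     return superPop
-- ===== Notes on version B (the rewrite author's own statement) =====
-- stated objective: alternative
-- what changed: B normalises the gwas list in one uppercase-then-maybe-split pipeline (instead of A's branching getPopList that uppercases twice on the bar path), stores the hierarchy as an if-chain instead of a dict, and instead of scanning the fixed hierarchy for its first member of the gwas list it filters the gwas list to hierarchy members and takes the min by hierarchy index, defaulting to superPop.
import Mathlib
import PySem

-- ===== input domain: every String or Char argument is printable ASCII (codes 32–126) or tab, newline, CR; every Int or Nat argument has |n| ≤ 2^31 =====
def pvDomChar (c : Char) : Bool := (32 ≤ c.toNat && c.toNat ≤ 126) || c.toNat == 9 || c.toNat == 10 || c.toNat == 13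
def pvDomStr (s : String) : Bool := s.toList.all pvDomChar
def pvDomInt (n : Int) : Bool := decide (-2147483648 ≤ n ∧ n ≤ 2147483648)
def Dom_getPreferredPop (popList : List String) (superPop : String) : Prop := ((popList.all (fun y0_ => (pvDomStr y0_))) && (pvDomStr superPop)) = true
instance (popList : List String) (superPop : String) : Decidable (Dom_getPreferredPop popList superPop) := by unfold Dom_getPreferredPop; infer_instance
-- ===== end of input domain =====

-- B normalises the gwas list in one uppercase-then-maybe-split pipeline, keeps the hierarchy as an
-- if-chain instead of a dict, and picks the gwas population with the best hierarchy rank (min by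
-- index over the filtered list) instead of scanning the hierarchy for its first member; same value.

-- ===== PORT A =====
-- helper getPopList of A, for the list-typed argument
def getPopListPort (popList : List String) : List String :=
  if popList.length = 1 ∧ PySem.Str.isIn "|" (popList.headD "") then
    -- falls through to the string path with popListStr = popList[0].upper(); .upper() is applied again there
    let s := PySem.Str.upper (PySem.Str.upper (popList.headD ""))
    if PySem.Str.isIn "|" s then (PySem.Str.split? s "|").getD [s] else [s]
  else
    popList.map PySem.Str.upper

-- the superPopHeirarchy dict literal of A
def pvHier : PySem.Dict String (List String) :=
  PySem.Dict.ofList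
    [ ("EUR", ["EUR", "AMR", "SAS", "EAS", "AFR"])
    , ("AMR", ["AMR", "EUR", "SAS", "EAS", "AFR"])
    , ("SAS", ["SAS", "EAS", "AMR", "EUR", "AFR"])
    , ("EAS", ["EAS", "SAS", "AMR", "EUR", "AFR"])
    , ("AFR", ["AFR", "AMR", "SAS", "EUR", "EAS"]) ]

def getPreferredPop (popList : List String) (superPop : String) : String :=
  let pl := getPopListPort popList
  if pl.length = 1 ∧ PySem.Str.lower (pl.headD "") = "na" then superPop
  else
    match pvHier.get? superPop with
    | none => ""   -- Python raises KeyError here; excluded by Pre_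
    | some keys =>
      match keys.find? (fun pop => pl.contains pop) with
      | some pop => pop
      | none => superPop

-- ===== PORT B =====
-- B's _hierarchy: an if-chain, no dict (none = Python's explicit KeyError; excluded by Pre_)
def pvHierOf (sp : String) : Option (List String) :=
  if sp = "EUR" then some ["EUR", "AMR", "SAS", "EAS", "AFR"]
  else if sp = "AMR" then some ["AMR", "EUR", "SAS", "EAS", "AFR"]
  else if sp = "SAS" then some ["SAS", "EAS", "AMR", "EUR", "AFR"]
  else if sp = "EAS" then some ["EAS", "SAS", "AMR", "EUR", "AFR"]
  else if sp = "AFR" then some ["AFR", "AMR", "SAS", "EUR", "EAS"]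
  else none

def getPreferredPop_alt (popList : List String) (superPop : String) : String :=
  let ups0 := popList.map PySem.Str.upper
  let ups := if ups0.length = 1 ∧ PySem.Str.isIn "|" (ups0.headD "") then
               (PySem.Str.split? (ups0.headD "") "|").getD [] else ups0
  if ups.map PySem.Str.lower = ["na"] then superPop
  else
    match pvHierOf superPop with
    | none => ""   -- Python raises KeyError here; excluded by Pre_
    | some keys =>
      -- matched = [p for p in ups if p in keys]; min(matched, key=keys.index) if matched else superPop
      let matched := ups.filter (fun p => keys.contains p)
      match PySem.List.min? matched (fun p => (PySem.List.index? keys p).getD 0) with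
      | some m => m
      | none => superPop

-- ===== PRECONDITION & SPEC =====
-- Pre_ excludes superPop values that are not one of the five hierarchy keys (unless the gwas pop
-- list is the single bar-free entry reading 'na', which short-circuits): Python raises KeyError there.
def Pre_getPreferredPop (popList : List String) (superPop : String) : Prop :=
  superPop ∈ ["EUR", "AMR", "SAS", "EAS", "AFR"] ∨
  (popList.length = 1 ∧ PySem.Str.isIn "|" (popList.headD "") = false ∧
    PySem.Str.lower (PySem.Str.upper (popList.headD "")) = "na")
instance (popList : List String) (superPop : String) : Decidable (Pre_getPreferredPop popList superPop) := by unfold Pre_getPreferredPop; infer_instance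

def pvWitness_getPreferredPop : List String × String := (["sas", "eur"], "EAS")

def Spec_getPreferredPop (popList : List String) (superPop : String) (out : String) : Prop := out = getPreferredPop_alt popList superPop
instance (popList : List String) (superPop : String) (out : String) : Decidable (Spec_getPreferredPop popList superPop out) := by unfold Spec_getPreferredPop; infer_instance

-- ===== CLAIM (what is proved, stated in full; the proofs are below) =====
def Claim_equal_getPreferredPop : Prop := ∀ (popList : List String) (superPop : String), Dom_getPreferredPop popList superPop → Pre_getPreferredPop popList superPop → Spec_getPreferredPop popList superPop (getPreferredPop popList superPop)

-- ===== LEMMAS AND PROOFS =====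

theorem pvUpperChar_idem (c : Char) :
    PySem.Chars.upperChar (PySem.Chars.upperChar c) = PySem.Chars.upperChar c := by
  unfold PySem.Chars.upperChar PySem.Chars.islower
  by_cases h : ('a' ≤ c ∧ c ≤ 'z')
  · have h1 : 97 ≤ c.toNat := by
      have := h.1; rw [Char.le_def] at this; exact UInt32.le_iff_toNat_le.mp this
    have h2 : c.toNat ≤ 122 := by
      have := h.2; rw [Char.le_def] at this; exact UInt32.le_iff_toNat_le.mp this
    have hval : (c.toNat - 32).isValidChar := by left; omega
    have htn : (Char.ofNat (c.toNat - 32)).toNat = c.toNat - 32 := by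
      rw [Char.toNat_ofNat]; simp [hval]
    have hcond : (decide ('a' ≤ c) && decide (c ≤ 'z')) = true := by
      simp [h.1, h.2]
    rw [if_pos hcond]
    have hnl : ¬ ('a' ≤ Char.ofNat (c.toNat - 32)) := by
      intro hc
      rw [Char.le_def] at hc
      have h97 : 97 ≤ (Char.ofNat (c.toNat - 32)).toNat := UInt32.le_iff_toNat_le.mp hc
      omega
    rw [if_neg (by simp [hnl])]
  · have hcond : (decide ('a' ≤ c) && decide (c ≤ 'z')) = false := by
      simpa [Decidable.not_and_iff_or_not] using h
    rw [if_neg (by simp [hcond]), if_neg (by simp [hcond])]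

theorem pvUpperChar_bar (c : Char) :
    PySem.Chars.upperChar c = '|' ↔ c = '|' := by
  unfold PySem.Chars.upperChar PySem.Chars.islower
  by_cases h : ('a' ≤ c ∧ c ≤ 'z')
  · have h1 : 97 ≤ c.toNat := by
      have := h.1; rw [Char.le_def] at this; exact UInt32.le_iff_toNat_le.mp this
    have h2 : c.toNat ≤ 122 := by
      have := h.2; rw [Char.le_def] at this; exact UInt32.le_iff_toNat_le.mp this
    have hval : (c.toNat - 32).isValidChar := by left; omega
    have htn : (Char.ofNat (c.toNat - 32)).toNat = c.toNat - 32 := by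
      rw [Char.toNat_ofNat]; simp [hval]
    have hcond : (decide ('a' ≤ c) && decide (c ≤ 'z')) = true := by
      simp [h.1, h.2]
    rw [if_pos hcond]
    constructor
    · intro he
      exfalso
      have heq : (Char.ofNat (c.toNat - 32)).toNat = ('|' : Char).toNat := by rw [he]
      have hb : ('|' : Char).toNat = 124 := by decide
      omega
    · intro he
      exfalso
      have hcn : c.toNat = 124 := by rw [he]; decide
      omega
  · have hcond : (decide ('a' ≤ c) && decide (c ≤ 'z')) = false := by
      simpa [Decidable.not_and_iff_or_not] using h
    rw [if_neg (by simp [hcond])]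

theorem pvChars_upper_idem (l : List Char) :
    PySem.Chars.upper (PySem.Chars.upper l) = PySem.Chars.upper l := by
  unfold PySem.Chars.upper
  rw [List.map_map]
  exact List.map_congr_left (fun c _ => pvUpperChar_idem c)

theorem pvUpper_idem (s : String) :
    PySem.Str.upper (PySem.Str.upper s) = PySem.Str.upper s := by
  unfold PySem.Str.upper
  rw [String.toList_ofList, pvChars_upper_idem]

theorem pvIsIn_bar_upper (s : String) :
    PySem.Str.isIn "|" (PySem.Str.upper s) = PySem.Str.isIn "|" s := by
  have hmem : ∀ (l : List Char), ('|' ∈ PySem.Chars.upper l ↔ '|' ∈ l) := by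
    intro l
    unfold PySem.Chars.upper
    simp only [List.mem_map]
    constructor
    · rintro ⟨c, hc, he⟩
      rwa [(pvUpperChar_bar c).mp he] at hc
    · intro hc
      exact ⟨'|', hc, (pvUpperChar_bar '|').mpr rfl⟩
  have hinf : ∀ (l : List Char), (['|'] <:+: l ↔ '|' ∈ l) := by
    intro l
    constructor
    · intro hi; exact hi.subset (by simp)
    · intro hm
      rcases List.append_of_mem hm with ⟨a, b, rfl⟩
      exact ⟨a, b, by simp⟩
  have hbar : ("|" : String).toList = ['|'] := rfl
  simp only [PySem.Str.isIn_eq, PySem.Str.toList_upper, hbar]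
  cases hb : PySem.Chars.isIn ['|'] s.toList
  · have hni : ¬ (['|'] <:+: s.toList) := (PySem.Chars.isIn_eq_false_iff _ _).mp hb
    apply (PySem.Chars.isIn_eq_false_iff _ _).mpr
    intro hi
    exact hni ((hinf _).mpr ((hmem _).mp ((hinf _).mp hi)))
  · have hi : ['|'] <:+: s.toList := (PySem.Chars.isIn_iff_infix _ _).mp hb
    apply (PySem.Chars.isIn_iff_infix _ _).mpr
    exact (hinf _).mpr ((hmem _).mpr ((hinf _).mp hi))

theorem pvSplit_bar_some (t : String) : ∃ r, PySem.Str.split? t "|" = some r := by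
  cases h : PySem.Str.split? t "|" with
  | some r => exact ⟨r, rfl⟩
  | none =>
    exfalso
    have hb := PySem.Str.split?_map t "|"
    rw [h] at hb
    simp [PySem.Chars.split?] at hb

theorem pvNorm_eq (popList : List String) :
    (if (popList.map PySem.Str.upper).length = 1 ∧
        PySem.Str.isIn "|" ((popList.map PySem.Str.upper).headD "") then
       (PySem.Str.split? ((popList.map PySem.Str.upper).headD "") "|").getD []
     else popList.map PySem.Str.upper) = getPopListPort popList := by
  unfold getPopListPort
  cases popList with
  | nil => simp
  | cons s t =>
    cases t with
    | cons s2 r => simp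
    | nil =>
      by_cases hbar : PySem.Str.isIn "|" s = true
      · have hbu : PySem.Str.isIn "|" (PySem.Str.upper s) = true := by
          rw [pvIsIn_bar_upper]; exact hbar
        rcases pvSplit_bar_some (PySem.Str.upper s) with ⟨r, hr⟩
        simp only [List.map_cons, List.map_nil, List.headD, List.length_cons,
          List.length_nil]
        rw [if_pos ⟨trivial, hbu⟩, if_pos ⟨trivial, hbar⟩]
        simp only [pvUpper_idem]
        rw [if_pos hbu, hr]
        rfl
      · have hbu : ¬ (PySem.Str.isIn "|" (PySem.Str.upper s) = true) := by
          rw [pvIsIn_bar_upper]; exact hbar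
        simp only [List.map_cons, List.map_nil, List.headD, List.length_cons,
          List.length_nil]
        rw [if_neg (fun hc => hbu hc.2), if_neg (fun hc => hbar hc.2)]

theorem pvHier_eq (sp : String) : pvHier.get? sp = pvHierOf sp := by
  have h : pvHier =
      (((((PySem.Dict.empty.insert "EUR" ["EUR", "AMR", "SAS", "EAS", "AFR"]).insert
        "AMR" ["AMR", "EUR", "SAS", "EAS", "AFR"]).insert
        "SAS" ["SAS", "EAS", "AMR", "EUR", "AFR"]).insert
        "EAS" ["EAS", "SAS", "AMR", "EUR", "AFR"]).insert
        "AFR" ["AFR", "AMR", "SAS", "EUR", "EAS"]) := rfl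
  rw [h]
  unfold pvHierOf
  simp only [PySem.Dict.get?_insert, PySem.Dict.get?_empty]
  split_ifs <;> simp_all

theorem pvGuard_eq (pl : List String) :
    (pl.map PySem.Str.lower = ["na"]) ↔
      (pl.length = 1 ∧ PySem.Str.lower (pl.headD "") = "na") := by
  cases pl with
  | nil => simp
  | cons x t =>
    cases t with
    | nil => simp
    | cons y r => simp

theorem pvCore (k0 k1 k2 k3 k4 : String)
    (h01 : k0 ≠ k1) (h02 : k0 ≠ k2) (h03 : k0 ≠ k3) (h04 : k0 ≠ k4)
    (h12 : k1 ≠ k2) (h13 : k1 ≠ k3) (h14 : k1 ≠ k4)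
    (h23 : k2 ≠ k3) (h24 : k2 ≠ k4) (h34 : k3 ≠ k4) (sp : String) (pl : List String) :
    (match [k0, k1, k2, k3, k4].find? (fun pop => pl.contains pop) with
     | some pop => pop
     | none => sp)
      = (match PySem.List.min? (pl.filter (fun p => [k0, k1, k2, k3, k4].contains p))
            (fun p => (PySem.List.index? [k0, k1, k2, k3, k4] p).getD 0) with
         | some m => m
         | none => sp) := by
  have i0 : (PySem.List.index? [k0, k1, k2, k3, k4] k0).getD 0 = 0 := by
    simp [PySem.List.index?, List.idxOf?, List.findIdx?_cons]
  have i1 : (PySem.List.index? [k0, k1, k2, k3, k4] k1).getD 0 = 1 := by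
    simp [PySem.List.index?, List.idxOf?, List.findIdx?_cons, h01]
  have i2 : (PySem.List.index? [k0, k1, k2, k3, k4] k2).getD 0 = 2 := by
    simp [PySem.List.index?, List.idxOf?, List.findIdx?_cons, h02, h12]
  have i3 : (PySem.List.index? [k0, k1, k2, k3, k4] k3).getD 0 = 3 := by
    simp [PySem.List.index?, List.idxOf?, List.findIdx?_cons, h03, h13, h23]
  have i4 : (PySem.List.index? [k0, k1, k2, k3, k4] k4).getD 0 = 4 := by
    simp [PySem.List.index?, List.idxOf?, List.findIdx?_cons, h04, h14, h24, h34]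
  cases hmin : PySem.List.min? (pl.filter (fun p => [k0, k1, k2, k3, k4].contains p))
      (fun p => (PySem.List.index? [k0, k1, k2, k3, k4] p).getD 0) with
  | none =>
    have hm : pl.filter (fun p => [k0, k1, k2, k3, k4].contains p) = [] :=
      (PySem.List.min?_eq_none_iff _ _).mp hmin
    have hnot : ∀ j, j ∈ ([k0, k1, k2, k3, k4] : List String) → j ∉ pl := by
      intro j hj hjp
      have hmem : j ∈ pl.filter (fun p => [k0, k1, k2, k3, k4].contains p) :=
        List.mem_filter.mpr ⟨hjp, by simpa using hj⟩
      rw [hm] at hmem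
      simp at hmem
    have n0 : k0 ∉ pl := hnot k0 (by simp)
    have n1 : k1 ∉ pl := hnot k1 (by simp)
    have n2 : k2 ∉ pl := hnot k2 (by simp)
    have n3 : k3 ∉ pl := hnot k3 (by simp)
    have n4 : k4 ∉ pl := hnot k4 (by simp)
    simp [List.find?, n0, n1, n2, n3, n4]
  | some m =>
    have hmm := PySem.List.min?_mem hmin
    have hle := PySem.List.min?_isMin hmin
    rcases List.mem_filter.mp hmm with ⟨hmp, hmk⟩
    have hmK : m ∈ ([k0, k1, k2, k3, k4] : List String) := by simpa using hmk
    have hin : ∀ j, j ∈ ([k0, k1, k2, k3, k4] : List String) → j ∈ pl →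
        (PySem.List.index? [k0, k1, k2, k3, k4] m).getD 0 ≤
          (PySem.List.index? [k0, k1, k2, k3, k4] j).getD 0 := by
      intro j hj hjp
      exact hle j (List.mem_filter.mpr ⟨hjp, by simpa using hj⟩)
    simp only [List.mem_cons, List.not_mem_nil, or_false] at hmK
    rcases hmK with rfl | rfl | rfl | rfl | rfl
    · simp [List.find?, hmp]
    · have n0 : k0 ∉ pl := by
        intro h0
        have := hin k0 (by simp) h0
        rw [i1, i0] at this
        omega
      simp [List.find?, n0, hmp]
    · have n0 : k0 ∉ pl := by
        intro h0; have := hin k0 (by simp) h0; rw [i2, i0] at this; omega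
      have n1 : k1 ∉ pl := by
        intro h0; have := hin k1 (by simp) h0; rw [i2, i1] at this; omega
      simp [List.find?, n0, n1, hmp]
    · have n0 : k0 ∉ pl := by
        intro h0; have := hin k0 (by simp) h0; rw [i3, i0] at this; omega
      have n1 : k1 ∉ pl := by
        intro h0; have := hin k1 (by simp) h0; rw [i3, i1] at this; omega
      have n2 : k2 ∉ pl := by
        intro h0; have := hin k2 (by simp) h0; rw [i3, i2] at this; omega
      simp [List.find?, n0, n1, n2, hmp]
    · have n0 : k0 ∉ pl := by
        intro h0; have := hin k0 (by simp) h0; rw [i4, i0] at this; omega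
      have n1 : k1 ∉ pl := by
        intro h0; have := hin k1 (by simp) h0; rw [i4, i1] at this; omega
      have n2 : k2 ∉ pl := by
        intro h0; have := hin k2 (by simp) h0; rw [i4, i2] at this; omega
      have n3 : k3 ∉ pl := by
        intro h0; have := hin k3 (by simp) h0; rw [i4, i3] at this; omega
      simp [List.find?, n0, n1, n2, n3, hmp]

-- the two programs agree on every input (the KeyError branch is the shared "" fallback)
theorem pvEq (popList : List String) (superPop : String) :
    getPreferredPop popList superPop = getPreferredPop_alt popList superPop := by
  unfold getPreferredPop getPreferredPop_alt
  simp only [pvNorm_eq]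
  by_cases hg : (getPopListPort popList).map PySem.Str.lower = ["na"]
  · rw [if_pos hg, if_pos ((pvGuard_eq _).mp hg)]
  · rw [if_neg hg, if_neg (fun hc => hg ((pvGuard_eq _).mpr hc))]
    rw [pvHier_eq]
    by_cases h0 : superPop = "EUR"
    · subst h0
      rw [show pvHierOf "EUR" = some ["EUR", "AMR", "SAS", "EAS", "AFR"] from rfl]
      exact pvCore _ _ _ _ _ (by decide) (by decide) (by decide) (by decide) (by decide)
        (by decide) (by decide) (by decide) (by decide) (by decide) _ _
    · by_cases h1 : superPop = "AMR"
      · subst h1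
        rw [show pvHierOf "AMR" = some ["AMR", "EUR", "SAS", "EAS", "AFR"] from rfl]
        exact pvCore _ _ _ _ _ (by decide) (by decide) (by decide) (by decide) (by decide)
          (by decide) (by decide) (by decide) (by decide) (by decide) _ _
      · by_cases h2 : superPop = "SAS"
        · subst h2
          rw [show pvHierOf "SAS" = some ["SAS", "EAS", "AMR", "EUR", "AFR"] from rfl]
          exact pvCore _ _ _ _ _ (by decide) (by decide) (by decide) (by decide) (by decide)
            (by decide) (by decide) (by decide) (by decide) (by decide) _ _
        · by_cases h3 : superPop = "EAS"
          · subst h3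
            rw [show pvHierOf "EAS" = some ["EAS", "SAS", "AMR", "EUR", "AFR"] from rfl]
            exact pvCore _ _ _ _ _ (by decide) (by decide) (by decide) (by decide) (by decide)
              (by decide) (by decide) (by decide) (by decide) (by decide) _ _
          · by_cases h4 : superPop = "AFR"
            · subst h4
              rw [show pvHierOf "AFR" = some ["AFR", "AMR", "SAS", "EUR", "EAS"] from rfl]
              exact pvCore _ _ _ _ _ (by decide) (by decide) (by decide) (by decide) (by decide)
                (by decide) (by decide) (by decide) (by decide) (by decide) _ _
            · have hn : pvHierOf superPop = none := by
                unfold pvHierOf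
                rw [if_neg h0, if_neg h1, if_neg h2, if_neg h3, if_neg h4]
              rw [hn]

-- ===== VERDICT (by name: the statement is the Claim_ definition above) =====
theorem getPreferredPop_spec : Claim_equal_getPreferredPop := by
  intro popList superPop _dom _pre
  unfold Spec_getPreferredPop
  exact pvEq popList superPop
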